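-- pv_equiv track=rewrite | github.com/yazanh-beep/PTHNCSCO | push_vlan_100.py | normalize_interface_name
-- ===== SOURCE A (Python) =====
-- def normalize_interface_name(intf):
--     if not intf:
--         return ""
--     replacements = {
--         'Te': 'TenGigabitEthernet',
--         'Gi': 'GigabitEthernet',
--         'Fa': 'FastEthernet',
--         'Et': 'Ethernet',
--         'Po': 'Port-channel',
--         'Vl': 'Vlan'
--     }
--     intf = intf.strip()
--     for short, full in replacements.items():
--         if intf.startswith(short) and len(intf) > len(short):
--             next_char = intf[len(short)]
--             if next_char.isdigit() or next_char == '/':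
--                 return intf.replace(short, full, 1)
--     return intf.lower()
-- ===== SOURCE B (Python) =====
-- def normalize_interface_name(intf):
--     replacements = {
--         'Te': 'TenGigabitEthernet',
--         'Gi': 'GigabitEthernet',
--         'Fa': 'FastEthernet',
--         'Et': 'Ethernet',
--         'Po': 'Port-channel',
--         'Vl': 'Vlan'
--     }
--     s = intf.strip()
--     full = replacements.get(s[:2])
--     if full is not None and len(s) > 2 and (s[2].isdigit() or s[2] == '/'):
--         return full + s[2:]
--     return s.lower()
-- ===== Notes on version B (the rewrite author's own statement) =====
-- stated objective: idiomatic
-- what changed: Replaces the loop over the replacement dict (startswith + count-limited str.replace per entry) with a single dict lookup on the stripped string's first two characters followed by direct concatenation full + s[2:]; no loop and no scanning replace remain.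
import Mathlib
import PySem

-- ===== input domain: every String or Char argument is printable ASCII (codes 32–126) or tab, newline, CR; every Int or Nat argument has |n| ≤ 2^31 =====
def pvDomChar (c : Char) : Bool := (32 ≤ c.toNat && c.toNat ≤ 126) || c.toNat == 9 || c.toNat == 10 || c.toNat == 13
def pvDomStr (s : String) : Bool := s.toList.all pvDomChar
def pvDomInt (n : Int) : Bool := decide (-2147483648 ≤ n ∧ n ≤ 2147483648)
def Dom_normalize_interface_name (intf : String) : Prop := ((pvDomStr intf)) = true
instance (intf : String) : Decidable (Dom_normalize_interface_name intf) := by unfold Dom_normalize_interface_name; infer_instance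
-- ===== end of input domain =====

-- B replaces A's loop over the replacement table (startswith + count-limited replace per entry)
-- by one dict lookup on the stripped string's first two characters and direct concatenation (idiomatic; same cost).

-- ===== PORT A =====
def pvReplacements : List (String × String) :=
  [("Te", "TenGigabitEthernet"), ("Gi", "GigabitEthernet"), ("Fa", "FastEthernet"),
   ("Et", "Ethernet"), ("Po", "Port-channel"), ("Vl", "Vlan")]

-- hand port of Python's s.replace(old, new, 1): exact for old ≠ '' (every key here has length 2)
def pvReplaceOnce (s old nw : List Char) : List Char :=
  if old.isPrefixOf s then nw ++ s.drop old.length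
  else
    match s with
    | [] => []
    | c :: t => c :: pvReplaceOnce t old nw

-- the for-loop over replacements.items(); the pyGet? 'none' arm is unreachable (the length guard holds)
def pvLoopA (s : List Char) : List (String × String) → List Char
  | [] => PySem.Chars.lower s
  | (short, full) :: rest =>
    if PySem.Chars.startswith s short.toList && decide (s.length > short.toList.length) then
      match PySem.List.pyGet? s (short.toList.length : Int) with
      | some c =>
        if PySem.Chars.isdigit c || c == '/' then pvReplaceOnce s short.toList full.toList
        else pvLoopA s rest
      | none => pvLoopA s rest
    else pvLoopA s rest

def normalize_interface_name (intf : String) : String :=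
  if intf.toList = [] then ""
  else String.ofList (pvLoopA (PySem.Chars.strip intf.toList) pvReplacements)

-- ===== PORT B =====
def pvReplDict : PySem.Dict String String :=
  PySem.Dict.ofList
    [("Te", "TenGigabitEthernet"), ("Gi", "GigabitEthernet"), ("Fa", "FastEthernet"),
     ("Et", "Ethernet"), ("Po", "Port-channel"), ("Vl", "Vlan")]

def pvAltCore (s : List Char) : List Char :=
  match pvReplDict.get? (String.ofList (PySem.List.slice s none (some 2))) with
  | some full =>
    if decide (s.length > 2) then
      match PySem.List.pyGet? s (2 : Int) with
      | some c =>
        if PySem.Chars.isdigit c || c == '/' then full.toList ++ PySem.List.slice s (some 2) none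
        else PySem.Chars.lower s
      | none => PySem.Chars.lower s
    else PySem.Chars.lower s
  | none => PySem.Chars.lower s

def normalize_interface_name_alt (intf : String) : String :=
  String.ofList (pvAltCore (PySem.Chars.strip intf.toList))

-- ===== PRECONDITION & SPEC =====
def Spec_normalize_interface_name (intf : String) (out : String) : Prop := out = normalize_interface_name_alt intf
instance (intf : String) (out : String) : Decidable (Spec_normalize_interface_name intf out) := by unfold Spec_normalize_interface_name; infer_instance

-- ===== CLAIM (what is proved, stated in full; the proofs are below) =====
def Claim_equal_normalize_interface_name : Prop := ∀ (intf : String), Dom_normalize_interface_name intf → Spec_normalize_interface_name intf (normalize_interface_name intf)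

-- ===== LEMMAS AND PROOFS =====

theorem pvBeq_ofList_false (t : String) (l : List Char) (h : t.toList ≠ l) :
    (t == String.ofList l) = false := by
  rw [beq_eq_false_iff_ne]
  intro he
  exact h (by rw [he]; simp)

theorem pvDict_none (l : List Char) (h : ∀ p ∈ pvReplacements, p.1.toList ≠ l) :
    pvReplDict.get? (String.ofList l) = none := by
  have hTe := pvBeq_ofList_false "Te" l (h ("Te", "TenGigabitEthernet") (by simp [pvReplacements]))
  have hGi := pvBeq_ofList_false "Gi" l (h ("Gi", "GigabitEthernet") (by simp [pvReplacements]))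
  have hFa := pvBeq_ofList_false "Fa" l (h ("Fa", "FastEthernet") (by simp [pvReplacements]))
  have hEt := pvBeq_ofList_false "Et" l (h ("Et", "Ethernet") (by simp [pvReplacements]))
  have hPo := pvBeq_ofList_false "Po" l (h ("Po", "Port-channel") (by simp [pvReplacements]))
  have hVl := pvBeq_ofList_false "Vl" l (h ("Vl", "Vlan") (by simp [pvReplacements]))
  rw [show pvReplDict = PySem.Dict.mk
    [("Te", "TenGigabitEthernet"), ("Gi", "GigabitEthernet"), ("Fa", "FastEthernet"),
     ("Et", "Ethernet"), ("Po", "Port-channel"), ("Vl", "Vlan")] from rfl]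
  simp [hTe, hGi, hFa, hEt, hPo, hVl, PySem.Dict.get?]

theorem pvGet2 (c1 c2 c3 : Char) (r : List Char) :
    PySem.List.pyGet? (c1::c2::c3::r) (2:Int) = some c3 := by
  rw [show (2:Int) = ((2:Nat):Int) by norm_num, PySem.List.pyGet?_natCast]
  simp

-- the two cores agree on every (stripped) character list
theorem pvCore_eq (s : List Char) : pvLoopA s pvReplacements = pvAltCore s := by
  match s with
  | [] => decide
  | [c1] =>
    have hsl1 : PySem.List.slice [c1] none (some 2) = [c1] := by
      rw [PySem.List.slice_to [c1] (show (0:Int) ≤ 2 by norm_num)]; simp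
    have hd := pvDict_none [c1] (by
      intro p hp
      simp only [pvReplacements, List.mem_cons, List.not_mem_nil, or_false] at hp
      rcases hp with rfl | rfl | rfl | rfl | rfl | rfl <;> simp)
    simp [pvLoopA, pvReplacements, PySem.Chars.startswith, List.isPrefixOf, pvAltCore, hsl1, hd]
  | c1 :: c2 :: r =>
    have hsl : PySem.List.slice (c1::c2::r) none (some 2) = [c1, c2] := by
      rw [PySem.List.slice_to (c1::c2::r) (show (0:Int) ≤ 2 by norm_num)]; simp
    by_cases h1 : 'T' = c1 ∧ 'e' = c2
    · obtain ⟨e1, e2⟩ := h1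
      subst e1; subst e2
      cases r with
      | nil => decide
      | cons c3 r' =>
        have hsl2 : PySem.List.slice ('T'::'e'::c3::r') (some 2) none = c3::r' := by
          rw [PySem.List.slice_from ('T'::'e'::c3::r') (show (0:Int) ≤ 2 by norm_num)]; simp
        have hg : pvReplDict.get? (String.ofList ['T', 'e']) = some "TenGigabitEthernet" := by decide
        simp [pvLoopA, pvReplacements, PySem.Chars.startswith, List.isPrefixOf, pvReplaceOnce,
          pvAltCore, hsl, pvGet2, hsl2, hg]
    · by_cases h2 : 'G' = c1 ∧ 'i' = c2
      · obtain ⟨e1, e2⟩ := h2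
        subst e1; subst e2
        cases r with
        | nil => decide
        | cons c3 r' =>
          have hsl2 : PySem.List.slice ('G'::'i'::c3::r') (some 2) none = c3::r' := by
            rw [PySem.List.slice_from ('G'::'i'::c3::r') (show (0:Int) ≤ 2 by norm_num)]; simp
          have hg : pvReplDict.get? (String.ofList ['G', 'i']) = some "GigabitEthernet" := by decide
          simp [pvLoopA, pvReplacements, PySem.Chars.startswith, List.isPrefixOf, pvReplaceOnce,
            pvAltCore, hsl, pvGet2, hsl2, hg]
      · by_cases h3 : 'F' = c1 ∧ 'a' = c2
        · obtain ⟨e1, e2⟩ := h3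
          subst e1; subst e2
          cases r with
          | nil => decide
          | cons c3 r' =>
            have hsl2 : PySem.List.slice ('F'::'a'::c3::r') (some 2) none = c3::r' := by
              rw [PySem.List.slice_from ('F'::'a'::c3::r') (show (0:Int) ≤ 2 by norm_num)]; simp
            have hg : pvReplDict.get? (String.ofList ['F', 'a']) = some "FastEthernet" := by decide
            simp [pvLoopA, pvReplacements, PySem.Chars.startswith, List.isPrefixOf, pvReplaceOnce,
              pvAltCore, hsl, pvGet2, hsl2, hg]
        · by_cases h4 : 'E' = c1 ∧ 't' = c2
          · obtain ⟨e1, e2⟩ := h4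
            subst e1; subst e2
            cases r with
            | nil => decide
            | cons c3 r' =>
              have hsl2 : PySem.List.slice ('E'::'t'::c3::r') (some 2) none = c3::r' := by
                rw [PySem.List.slice_from ('E'::'t'::c3::r') (show (0:Int) ≤ 2 by norm_num)]; simp
              have hg : pvReplDict.get? (String.ofList ['E', 't']) = some "Ethernet" := by decide
              simp [pvLoopA, pvReplacements, PySem.Chars.startswith, List.isPrefixOf, pvReplaceOnce,
                pvAltCore, hsl, pvGet2, hsl2, hg]
          · by_cases h5 : 'P' = c1 ∧ 'o' = c2
            · obtain ⟨e1, e2⟩ := h5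
              subst e1; subst e2
              cases r with
              | nil => decide
              | cons c3 r' =>
                have hsl2 : PySem.List.slice ('P'::'o'::c3::r') (some 2) none = c3::r' := by
                  rw [PySem.List.slice_from ('P'::'o'::c3::r') (show (0:Int) ≤ 2 by norm_num)]; simp
                have hg : pvReplDict.get? (String.ofList ['P', 'o']) = some "Port-channel" := by decide
                simp [pvLoopA, pvReplacements, PySem.Chars.startswith, List.isPrefixOf, pvReplaceOnce,
                  pvAltCore, hsl, pvGet2, hsl2, hg]
            · by_cases h6 : 'V' = c1 ∧ 'l' = c2
              · obtain ⟨e1, e2⟩ := h6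
                subst e1; subst e2
                cases r with
                | nil => decide
                | cons c3 r' =>
                  have hsl2 : PySem.List.slice ('V'::'l'::c3::r') (some 2) none = c3::r' := by
                    rw [PySem.List.slice_from ('V'::'l'::c3::r') (show (0:Int) ≤ 2 by norm_num)]; simp
                  have hg : pvReplDict.get? (String.ofList ['V', 'l']) = some "Vlan" := by decide
                  simp [pvLoopA, pvReplacements, PySem.Chars.startswith, List.isPrefixOf, pvReplaceOnce,
                    pvAltCore, hsl, pvGet2, hsl2, hg]
              · have b1 : (('T':Char) == c1 && 'e' == c2) = false := by simpa using h1
                have b2 : (('G':Char) == c1 && 'i' == c2) = false := by simpa using h2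
                have b3 : (('F':Char) == c1 && 'a' == c2) = false := by simpa using h3
                have b4 : (('E':Char) == c1 && 't' == c2) = false := by simpa using h4
                have b5 : (('P':Char) == c1 && 'o' == c2) = false := by simpa using h5
                have b6 : (('V':Char) == c1 && 'l' == c2) = false := by simpa using h6
                have hd := pvDict_none [c1, c2] (by
                  intro p hp
                  simp only [pvReplacements, List.mem_cons, List.not_mem_nil, or_false] at hp
                  rcases hp with rfl | rfl | rfl | rfl | rfl | rfl <;>
                    first
                      | simpa using h1
                      | simpa using h2
                      | simpa using h3
                      | simpa using h4
                      | simpa using h5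
                      | simpa using h6)
                simp [pvLoopA, pvReplacements, PySem.Chars.startswith, List.isPrefixOf,
                  pvAltCore, hsl, hd, b1, b2, b3, b4, b5, b6]

theorem pvStrip_empty (intf : String) (h : intf.toList = []) :
    PySem.Chars.strip intf.toList = [] := by
  rw [h]; decide

-- ===== VERDICT (by name: the statement is the Claim_ definition above) =====
theorem normalize_interface_name_spec : Claim_equal_normalize_interface_name := by
  intro intf _
  unfold Spec_normalize_interface_name normalize_interface_name normalize_interface_name_alt
  split_ifs with h
  · rw [pvStrip_empty intf h, ← pvCore_eq]; rfl
  · rw [pvCore_eq]
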